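-- pv_equiv track=rewrite | github.com/gebruder/lenigma | lenigma/__init__.py | _downsample_int
-- ===== SOURCE A (Python) =====
-- def _downsample_int(samples: list[int], factor: int) -> list[int]:
--     """
--     Box-filter then decimate by an integer factor. The box-filter
--     average attenuates frequencies near the destination Nyquist enough
--     to keep aliasing out of the 690-2125 Hz protocol band, which is
--     well below SAMPLE_RATE / 2. Pure-stdlib; quality is fine for
--     integer ratios like 48 kHz -> 16 kHz (factor 3).
--     """
--     if factor <= 1:
--         return list(samples)
--     out: list[int] = []
--     n = len(samples)
--     i = 0
--     while i + factor <= n: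
--         out.append(sum(samples[i:i + factor]) // factor)
--         i += factor
--     return out
-- ===== SOURCE B (Python) =====
-- def _downsample_int(samples: list[int], factor: int) -> list[int]:
--     # Single flat pass with an accumulator/counter instead of slicing windows.
--     if factor <= 1:
--         return list(samples)
--     out: list[int] = []
--     acc = 0
--     count = 0
--     for x in samples:
--         acc += x
--         count += 1
--         if count == factor:
--             out.append(acc // factor)
--             acc = 0
--             count = 0
--     return out
-- ===== Notes on version B (the rewrite author's own statement) =====
-- stated objective: alternative
-- what changed: Replaces the index-stepping while loop that slices out and sums each window with a single flat for-loop over the samples maintaining an accumulator and a counter, emitting acc // factor whenever the counter reaches factor.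
import Mathlib
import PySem

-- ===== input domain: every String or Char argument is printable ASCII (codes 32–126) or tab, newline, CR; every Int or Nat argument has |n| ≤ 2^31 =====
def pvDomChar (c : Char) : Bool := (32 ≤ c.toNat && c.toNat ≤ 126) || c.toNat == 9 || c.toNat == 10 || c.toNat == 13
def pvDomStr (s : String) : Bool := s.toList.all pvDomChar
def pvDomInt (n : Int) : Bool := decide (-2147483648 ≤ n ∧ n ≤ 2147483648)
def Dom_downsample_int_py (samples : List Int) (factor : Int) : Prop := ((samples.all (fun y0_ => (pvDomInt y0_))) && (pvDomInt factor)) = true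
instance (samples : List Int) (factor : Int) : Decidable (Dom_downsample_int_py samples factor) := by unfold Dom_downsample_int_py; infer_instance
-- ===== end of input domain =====

-- B replaces A's window-slicing while loop by one flat accumulator/counter pass (alternative decomposition, same cost).


-- ===== PORT A =====
-- A's while loop:  while i + factor <= n: out.append(sum(samples[i:i+factor]) // factor); i += factor
-- (the '1 < factor' conjunct is a totality guard only: the loop is entered solely from the factor > 1 branch)
def downsampleALoop (samples : List Int) (factor : Int) (n : Int) (i : Int) (out : List Int) : List Int :=
  if _h : i + factor ≤ n ∧ 1 < factor then
    downsampleALoop samples factor n (i + factor)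
      (out ++ [PySem.Int.floordiv (PySem.List.slice samples (some i) (some (i + factor))).sum factor])
  else out
  termination_by (n - i).toNat
  decreasing_by omega

def downsample_int_py (samples : List Int) (factor : Int) : List Int :=
  if factor ≤ 1 then samples
  else downsampleALoop samples factor (samples.length : Int) 0 []

-- ===== PORT B =====
-- one step of B's flat pass: add the sample, bump the counter, emit and reset on a full window
def downsampleBStep (factor : Int) (st : List Int × Int × Int) (x : Int) : List Int × Int × Int :=
  let acc := st.2.1 + x
  let count := st.2.2 + 1
  if count = factor then (st.1 ++ [PySem.Int.floordiv acc factor], 0, 0)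
  else (st.1, acc, count)

def downsample_int_py_alt (samples : List Int) (factor : Int) : List Int :=
  if factor ≤ 1 then samples
  else (samples.foldl (downsampleBStep factor) ([], 0, 0)).1

-- ===== PRECONDITION & SPEC =====
def Spec_downsample_int_py (samples : List Int) (factor : Int) (out : List Int) : Prop := out = downsample_int_py_alt samples factor
instance (samples : List Int) (factor : Int) (out : List Int) : Decidable (Spec_downsample_int_py samples factor out) := by unfold Spec_downsample_int_py; infer_instance

-- ===== CLAIM (what is proved, stated in full; the proofs are below) =====
def Claim_equal_downsample_int_py : Prop := ∀ (samples : List Int) (factor : Int), Dom_downsample_int_py samples factor → Spec_downsample_int_py samples factor (downsample_int_py samples factor)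

-- ===== LEMMAS AND PROOFS =====

-- canonical fixed-width chunking, the common reference of both ports (proof helper only)
def chunks (k : Nat) (xs : List Int) : List Int :=
  if _h : k ≤ xs.length ∧ 0 < k then
    PySem.Int.floordiv (xs.take k).sum (k : Int) :: chunks k (xs.drop k)
  else []
  termination_by xs.length
  decreasing_by simp; omega

theorem chunks_of_le {k : Nat} {xs : List Int} (h : k ≤ xs.length) (hk : 0 < k) :
    chunks k xs = PySem.Int.floordiv (xs.take k).sum (k : Int) :: chunks k (xs.drop k) := by
  rw [chunks]; simp [h, hk]

theorem chunks_of_short {k : Nat} {xs : List Int} (h : xs.length < k) : chunks k xs = [] := by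
  rw [chunks, dif_neg (by omega)]

-- B's fold on a partial window: the counter never reaches factor
theorem bstep_run (factor : Int) (ys : List Int) :
    ∀ (out : List Int) (acc c : Int), 0 ≤ c → c + ys.length < factor →
    ys.foldl (downsampleBStep factor) (out, acc, c) = (out, acc + ys.sum, c + ys.length) := by
  induction ys with
  | nil => intro out acc c _ _; simp
  | cons y ys ih =>
    intro out acc c hc hlt
    simp only [List.foldl_cons, List.length_cons] at *
    have hne : ¬ (c + 1 = factor) := by omega
    simp only [downsampleBStep, hne, if_false]
    rw [ih out (acc + y) (c + 1) (by omega) (by push_cast at *; omega)]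
    simp only [Prod.mk.injEq, List.sum_cons]
    refine ⟨by trivial, by ring, by push_cast; ring⟩

-- B's fold on one full window: emit the window average and reset
theorem bstep_full (factor : Int) (hf : 1 < factor) (ys : List Int) (out : List Int)
    (hlen : (ys.length : Int) = factor) :
    ys.foldl (downsampleBStep factor) (out, 0, 0) =
      (out ++ [PySem.Int.floordiv ys.sum factor], 0, 0) := by
  rcases eq_or_ne ys [] with rfl | hne
  · simp at hlen; omega
  · obtain ⟨zs, z, rfl⟩ := (List.eq_nil_or_concat ys).resolve_left hne
    rw [List.concat_eq_append, List.foldl_append]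
    rw [bstep_run factor zs out 0 0 le_rfl (by simp at hlen ⊢; omega)]
    have hc : (0 : Int) + zs.length + 1 = factor := by simp at hlen; omega
    simp only [List.foldl_cons, List.foldl_nil, downsampleBStep, hc]
    simp [List.sum_append]

-- B's fold computes the canonical chunking
theorem bfold_eq_chunks (factor : Int) (hf : 1 < factor) (xs : List Int) :
    ∀ (out : List Int),
    (xs.foldl (downsampleBStep factor) (out, 0, 0)).1 = out ++ chunks factor.toNat xs := by
  induction hn : xs.length using Nat.strong_induction_on generalizing xs with
  | _ m ih =>
    intro out
    subst hn
    by_cases h : factor.toNat ≤ xs.length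
    · rw [chunks_of_le h (by omega)]
      have hxs : xs = xs.take factor.toNat ++ xs.drop factor.toNat := (List.take_append_drop _ _).symm
      conv_lhs => rw [hxs]
      rw [List.foldl_append,
        bstep_full factor hf _ out (by simp [List.length_take]; omega),
        ih (xs.drop factor.toNat).length (by simp [List.length_drop]; omega) _ rfl]
      have hcast : ((factor.toNat : Int)) = factor := by omega
      simp [hcast]
    · rw [chunks_of_short (by omega)]
      rw [bstep_run factor xs out 0 0 le_rfl (by omega)]
      simp

-- A's loop computes the canonical chunking of the remaining suffix
theorem aloop_eq_chunks (samples : List Int) (factor : Int) (hf : 1 < factor) :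
    ∀ (i : Int) (out : List Int), 0 ≤ i →
    downsampleALoop samples factor (samples.length : Int) i out
      = out ++ chunks factor.toNat (samples.drop i.toNat) := by
  intro i
  induction hi : ((samples.length : Int) - i).toNat using Nat.strong_induction_on generalizing i with
  | _ m ih =>
    intro out h0
    rw [downsampleALoop]
    by_cases hle : i + factor ≤ (samples.length : Int)
    · simp only [dif_pos (And.intro hle hf)]
      rw [ih (((samples.length : Int) - (i + factor)).toNat) (by omega) (i + factor) rfl (out ++ _) (by omega)]
      rw [chunks_of_le (k := factor.toNat) (xs := samples.drop i.toNat)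
        (by simp [List.length_drop]; omega) (by omega)]
      rw [PySem.List.slice_toNat samples h0 (by omega)]
      have h1 : (i + factor).toNat = i.toNat + factor.toNat := by omega
      have hcast : ((factor.toNat : Int)) = factor := by omega
      simp [h1, List.drop_drop, Nat.add_comm, hcast]
    · have : ¬ (i + factor ≤ (samples.length : Int) ∧ 1 < factor) := by tauto
      simp only [dif_neg this]
      rw [chunks_of_short (by simp [List.length_drop]; omega)]
      simp

-- ===== VERDICT (by name: the statement is the Claim_ definition above) =====
theorem downsample_int_py_spec : Claim_equal_downsample_int_py := by
  intro samples factor _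
  unfold Spec_downsample_int_py downsample_int_py downsample_int_py_alt
  by_cases h : factor ≤ 1
  · simp [h]
  · simp only [if_neg h]
    rw [aloop_eq_chunks samples factor (by omega) 0 [] le_rfl,
      bfold_eq_chunks factor (by omega) samples []]
    simp
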